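-- pv_equiv track=rewrite | github.com/NimbleBrainInc/mcp-text-utils | src/mcp_text_utils/api_models.py | to_case
-- ===== SOURCE A (Python) =====
-- def to_case(words: list[str], target: str) -> str:
--     """Convert word list to target case format."""
--     match target:
--         case "snake_case":
--             return "_".join(words)
--         case "SCREAMING_SNAKE_CASE":
--             return "_".join(w.upper() for w in words)
--         case "camelCase":
--             return words[0] + "".join(w.capitalize() for w in words[1:])
--         case "PascalCase":
--             return "".join(w.capitalize() for w in words)
--         case "kebab-case":
--             return "-".join(words)
--         case "Title Case":
--             return " ".join(w.capitalize() for w in words)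
--         case _:
--             return "_".join(words)
-- ===== SOURCE B (Python) =====
-- _SEPARATORS = {"kebab-case": "-", "PascalCase": "", "camelCase": "", "Title Case": " "}
--
--
-- def to_case(words: list[str], target: str) -> str:
--     """Convert word list to target case format."""
--     upper = target == "SCREAMING_SNAKE_CASE"
--     cap = target in ("PascalCase", "Title Case", "camelCase")
--     sep = _SEPARATORS.get(target, "_")
--     out = []
--     for i, w in enumerate(words):
--         if i:
--             out.append(sep)
--         if upper:
--             w = w.upper()
--         elif cap and (i or target != "camelCase"):
--             w = w.capitalize()
--         out.append(w)
--     return "".join(out)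
-- ===== Notes on version B (the rewrite author's own statement) =====
-- stated objective: alternative
-- what changed: B replaces A's seven per-case join/comprehension branches by one uniform accumulator loop over enumerate(words) driven by precomputed flags (upper/capitalize) and a separator lookup, appending separator and transformed word piecewise and joining once at the end; camelCase falls out of the i==0 test instead of a special branch.
import Mathlib
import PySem

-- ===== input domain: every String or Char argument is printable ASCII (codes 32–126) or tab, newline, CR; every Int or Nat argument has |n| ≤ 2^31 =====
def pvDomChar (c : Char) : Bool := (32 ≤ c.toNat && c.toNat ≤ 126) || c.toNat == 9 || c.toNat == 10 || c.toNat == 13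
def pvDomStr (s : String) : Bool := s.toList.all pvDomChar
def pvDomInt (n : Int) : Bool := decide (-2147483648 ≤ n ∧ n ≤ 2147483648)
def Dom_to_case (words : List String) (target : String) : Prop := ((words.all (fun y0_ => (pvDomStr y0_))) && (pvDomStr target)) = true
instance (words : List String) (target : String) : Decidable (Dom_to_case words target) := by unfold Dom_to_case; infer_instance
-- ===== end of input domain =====

-- B replaces A's per-case join branches by one uniform accumulator loop over the indexed words,
-- driven by precomputed flags and a separator lookup; objective: alternative decomposition.

-- shared helper: Python's str.capitalize (exact on the ASCII domain: first char uppercased, rest lowercased)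
def pyCapitalize (s : String) : String :=
  match s.toList with
  | [] => ""
  | c :: cs => String.ofList (PySem.Chars.upperChar c :: cs.map PySem.Chars.lowerChar)

-- ===== PORT A =====
def to_case (words : List String) (target : String) : String :=
  if target = "snake_case" then
    PySem.Str.join "_" words
  else if target = "SCREAMING_SNAKE_CASE" then
    PySem.Str.join "_" (words.map PySem.Str.upper)
  else if target = "camelCase" then
    -- words[0] raises IndexError on []; Pre_to_case excludes that input, so the getD default is unreachable
    ((PySem.List.pyGet? words 0).getD "") ++ PySem.Str.join "" ((PySem.List.slice words (some 1) none).map pyCapitalize)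
  else if target = "PascalCase" then
    PySem.Str.join "" (words.map pyCapitalize)
  else if target = "kebab-case" then
    PySem.Str.join "-" words
  else if target = "Title Case" then
    PySem.Str.join " " (words.map pyCapitalize)
  else
    PySem.Str.join "_" words

-- ===== PORT B =====
def pvSeparators : PySem.Dict String String :=
  PySem.Dict.mk [("kebab-case", "-"), ("PascalCase", ""), ("camelCase", ""), ("Title Case", " ")]

-- the for-loop of Source B: index, accumulated `out` list, remaining words
def altLoop (upper cap : Bool) (sep target : String) : Nat → List String → List String → List String
  | _, acc, [] => acc
  | i, acc, w :: ws =>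
    let acc := if i ≠ 0 then acc ++ [sep] else acc
    let w' := if upper then PySem.Str.upper w
              else if cap && (decide (i ≠ 0) || !(target == "camelCase")) then pyCapitalize w
              else w
    altLoop upper cap sep target (i + 1) (acc ++ [w']) ws

def to_case_alt (words : List String) (target : String) : String :=
  let upper := target == "SCREAMING_SNAKE_CASE"
  let cap := target == "PascalCase" || target == "Title Case" || target == "camelCase"
  let sep := PySem.Dict.getD pvSeparators target "_"
  PySem.Str.join "" (altLoop upper cap sep target 0 [] words)

-- ===== PRECONDITION & SPEC =====
-- Pre_ excludes only the inputs where A raises IndexError: target "camelCase" with an empty word list.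
def Pre_to_case (words : List String) (target : String) : Prop :=
  target = "camelCase" → words ≠ []
instance (words : List String) (target : String) : Decidable (Pre_to_case words target) := by
  unfold Pre_to_case; infer_instance

def pvWitness_to_case : List String × String := (["hello", "world"], "snake_case")

def Spec_to_case (words : List String) (target : String) (out : String) : Prop := out = to_case_alt words target
instance (words : List String) (target : String) (out : String) : Decidable (Spec_to_case words target out) := by unfold Spec_to_case; infer_instance

-- ===== CLAIM (what is proved, stated in full; the proofs are below) =====
def Claim_equal_to_case : Prop := ∀ (words : List String) (target : String), Dom_to_case words target → Pre_to_case words target → Spec_to_case words target (to_case words target)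

-- ===== LEMMAS AND PROOFS =====

-- the transform altLoop applies to every word after the first
def pvTfm (upper cap : Bool) (w : String) : String :=
  if upper then PySem.Str.upper w else if cap then pyCapitalize w else w

lemma altLoop_succ (u c : Bool) (sep tgt : String) :
    ∀ (ws : List String) (i : Nat) (acc : List String),
      altLoop u c sep tgt (i + 1) acc ws = acc ++ ws.flatMap (fun w => [sep, pvTfm u c w]) := by
  intro ws
  induction ws with
  | nil => intro i acc; simp [altLoop]
  | cons w ws ih =>
    intro i acc
    simp only [altLoop]
    rw [ih]
    simp [pvTfm]

lemma altLoop_zero_cons (u c : Bool) (sep tgt : String) (w : String) (ws : List String) :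
    altLoop u c sep tgt 0 [] (w :: ws) =
      (if u then PySem.Str.upper w
       else if c && !(tgt == "camelCase") then pyCapitalize w else w)
        :: ws.flatMap (fun v => [sep, pvTfm u c v]) := by
  simp only [altLoop]
  rw [altLoop_succ]
  simp

lemma chars_join_interleave (s : List Char) :
    ∀ (ts : List (List Char)) (x : List Char),
      PySem.Chars.join [] (x :: ts.flatMap (fun t => [s, t])) = PySem.Chars.join s (x :: ts) := by
  intro ts
  induction ts with
  | nil => intro x; simp
  | cons t ts ih =>
    intro x
    simp only [List.flatMap_cons, List.cons_append]
    rw [PySem.Chars.join_cons_cons, PySem.Chars.join_cons_cons]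
    simp only [List.append_nil, List.nil_append]
    rw [ih t, PySem.Chars.join_cons_cons]
    simp

-- the two join shapes agree: B's "".join with the separator interleaved = A's sep.join of the transformed words
lemma join_interleave (sep x : String) (T : String → String) (ws : List String) :
    PySem.Str.join "" (x :: ws.flatMap (fun v => [sep, T v])) =
      PySem.Str.join sep (x :: ws.map T) := by
  unfold PySem.Str.join
  congr 1
  have h : (x :: ws.flatMap fun v => [sep, T v]).map String.toList
      = x.toList :: (ws.map (fun v => (T v).toList)).flatMap (fun t => [sep.toList, t]) := by
    simp [List.map_flatMap, List.flatMap_map]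
  rw [h]
  have := chars_join_interleave sep.toList (ws.map fun v => (T v).toList) x.toList
  simpa [List.map_map, Function.comp] using this

lemma chars_join_nil_cons (x : List Char) (ts : List (List Char)) :
    PySem.Chars.join [] (x :: ts) = x ++ PySem.Chars.join [] ts := by
  cases ts with
  | nil => simp [PySem.Chars.join, List.intercalate]
  | cons t ts => rw [PySem.Chars.join_cons_cons]; simp

lemma join_nil_cons (x : String) (ts : List String) :
    PySem.Str.join "" (x :: ts) = x ++ PySem.Str.join "" ts := by
  apply String.toList_inj.mp
  simp only [PySem.Str.toList_join, String.toList_append, List.map_cons]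
  simpa using chars_join_nil_cons x.toList (ts.map String.toList)

-- ===== VERDICT (by name: the statement is the Claim_ definition above) =====
theorem to_case_spec : Claim_equal_to_case := by
  intro words target _ hpre
  unfold Spec_to_case to_case to_case_alt
  by_cases h1 : target = "snake_case"
  · subst h1
    simp only [pvSeparators, PySem.Dict.getD, PySem.Dict.get?]
    cases words with
    | nil => simp [altLoop, PySem.Str.join, PySem.Chars.join, List.intercalate]
    | cons w ws =>
      rw [altLoop_zero_cons, join_interleave]
      have ht : pvTfm false false = id := by funext v; simp [pvTfm]
      simp [ht]
  by_cases h2 : target = "SCREAMING_SNAKE_CASE"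
  · subst h2
    simp only [h1, pvSeparators, PySem.Dict.getD, PySem.Dict.get?]
    cases words with
    | nil => simp [altLoop, PySem.Str.join, PySem.Chars.join, List.intercalate]
    | cons w ws =>
      rw [altLoop_zero_cons, join_interleave]
      have ht : pvTfm true false = PySem.Str.upper := by funext v; simp [pvTfm]
      simp [ht]
  by_cases h3 : target = "camelCase"
  · subst h3
    cases words with
    | nil => exact absurd rfl (hpre rfl)
    | cons w ws =>
      simp only [h1, h2]
      rw [show PySem.Dict.getD pvSeparators "camelCase" "_" = "" from rfl]
      have hs : PySem.List.slice (w :: ws) (some 1) none = ws := by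
        rw [PySem.List.slice_from (w :: ws) (by norm_num : (0:Int) ≤ (1:Int))]; simp
      rw [altLoop_zero_cons, join_interleave, hs]
      have ht : pvTfm false true = pyCapitalize := by funext v; simp [pvTfm]
      rw [join_nil_cons]
      simp [ht, PySem.List.pyGet?, PySem.List.pyIdx?]
  by_cases h4 : target = "PascalCase"
  · subst h4
    simp only [h1, h2, h3, pvSeparators, PySem.Dict.getD, PySem.Dict.get?]
    cases words with
    | nil => simp [altLoop, PySem.Str.join, PySem.Chars.join, List.intercalate]
    | cons w ws =>
      rw [altLoop_zero_cons, join_interleave]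
      have ht : pvTfm false true = pyCapitalize := by funext v; simp [pvTfm]
      simp [ht]
  by_cases h5 : target = "kebab-case"
  · subst h5
    simp only [h1, h2, h3, h4, pvSeparators, PySem.Dict.getD, PySem.Dict.get?]
    cases words with
    | nil => simp [altLoop, PySem.Str.join, PySem.Chars.join, List.intercalate]
    | cons w ws =>
      rw [altLoop_zero_cons, join_interleave]
      have ht : pvTfm false false = id := by funext v; simp [pvTfm]
      simp [ht]
  by_cases h6 : target = "Title Case"
  · subst h6
    simp only [h1, h2, h3, h4, h5, pvSeparators, PySem.Dict.getD, PySem.Dict.get?]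
    cases words with
    | nil => simp [altLoop, PySem.Str.join, PySem.Chars.join, List.intercalate]
    | cons w ws =>
      rw [altLoop_zero_cons, join_interleave]
      have ht : pvTfm false true = pyCapitalize := by funext v; simp [pvTfm]
      simp [ht]
  · have e2 : (target == "SCREAMING_SNAKE_CASE") = false := by simp [h2]
    have e3 : (target == "camelCase") = false := by simp [h3]
    have e4 : (target == "PascalCase") = false := by simp [h4]
    have f5 : ("kebab-case" == target) = false := by simp [Ne.symm h5]
    have f4 : ("PascalCase" == target) = false := by simp [Ne.symm h4]
    have f3 : ("camelCase" == target) = false := by simp [Ne.symm h3]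
    have f6 : ("Title Case" == target) = false := by simp [Ne.symm h6]
    have e6 : (target == "Title Case") = false := by simp [h6]
    simp only [h1, h2, h3, h4, h5, h6, if_false, e2, e3, e4, e6, Bool.or_self, pvSeparators, PySem.Dict.getD, PySem.Dict.get?, List.find?, f3, f4, f5, f6]
    cases words with
    | nil => simp [altLoop, PySem.Str.join, PySem.Chars.join, List.intercalate]
    | cons w ws =>
      rw [altLoop_zero_cons, join_interleave]
      have ht : pvTfm false false = id := by funext v; simp [pvTfm]
      simp [ht]
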